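-- pv_equiv track=rewrite | github.com/getsentry/sentry | src/sentry_sdk_alpha/integrations/logging.py | _python_level_to_otel
-- ===== SOURCE A (Python) =====
-- def _python_level_to_otel(record_level):
--     # type: (int) -> Tuple[int, str]
--     for py_level, otel_severity_number, otel_severity_text in [
--         (50, 21, "fatal"),
--         (40, 17, "error"),
--         (30, 13, "warn"),
--         (20, 9, "info"),
--         (10, 5, "debug"),
--         (5, 1, "trace"),
--     ]:
--         if record_level >= py_level:
--             return otel_severity_number, otel_severity_text
--     return 0, "default"
-- ===== SOURCE B (Python) =====
-- def _python_level_to_otel(record_level):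
--     # type: (int) -> "Tuple[int, str]"
--     boundaries = [5, 10, 20, 30, 40, 50]
--     results = [(1, "trace"), (5, "debug"), (9, "info"),
--                (13, "warn"), (17, "error"), (21, "fatal")]
--     # hand-rolled bisect_right (no imports): first index with boundaries[i] > record_level
--     lo, hi = 0, len(boundaries)
--     while lo < hi:
--         mid = (lo + hi) // 2
--         if record_level < boundaries[mid]:
--             hi = mid
--         else:
--             lo = mid + 1
--     if lo == 0:
--         return (0, "default")
--     return results[lo - 1]
-- ===== Notes on version B (the rewrite author's own statement) =====
-- stated objective: alternative
-- what changed: The top-down linear scan over (threshold, severity) triples is replaced by a binary search (hand-rolled bisect_right) over an ascending boundary list followed by a table lookup, with the negative index mapping to (0, 'default').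
import Mathlib
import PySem

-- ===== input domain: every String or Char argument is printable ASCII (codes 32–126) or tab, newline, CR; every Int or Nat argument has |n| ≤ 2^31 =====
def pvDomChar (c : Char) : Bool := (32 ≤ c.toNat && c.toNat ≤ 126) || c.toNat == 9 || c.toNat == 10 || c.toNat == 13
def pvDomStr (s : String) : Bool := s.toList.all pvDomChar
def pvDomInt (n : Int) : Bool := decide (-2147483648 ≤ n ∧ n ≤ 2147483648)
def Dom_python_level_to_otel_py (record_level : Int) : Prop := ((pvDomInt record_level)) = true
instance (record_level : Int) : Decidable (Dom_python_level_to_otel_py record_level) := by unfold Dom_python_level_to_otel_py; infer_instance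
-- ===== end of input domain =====

-- B replaces A's top-down linear scan with a binary search over an ascending
-- boundary table plus a parallel results table (objective: alternative).

-- ===== PORT A =====
-- literal transliteration: scan the (py_level, number, text) triples top-down,
-- return on the first 'record_level >= py_level'
def pvScanA (record_level : Int) : List (Int × Int × String) → Int × String
  | [] => (0, "default")
  | (py_level, num, txt) :: rest =>
      if record_level ≥ py_level then (num, txt) else pvScanA record_level rest

def python_level_to_otel_py (record_level : Int) : Int × String :=
  pvScanA record_level
    [(50, 21, "fatal"), (40, 17, "error"), (30, 13, "warn"),
     (20, 9, "info"), (10, 5, "debug"), (5, 1, "trace")]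

-- ===== PORT B =====
-- literal transliteration of Source B's hand-rolled bisect_right while-loop
def pvBisectB (x : Int) (bs : List Int) (lo hi : Nat) : Nat :=
  if lo < hi then
    let mid := (lo + hi) / 2
    if x < (PySem.List.pyGet? bs (mid : Int)).getD 0 then pvBisectB x bs lo mid
    else pvBisectB x bs (mid + 1) hi
  else lo
termination_by hi - lo
decreasing_by all_goals omega

def python_level_to_otel_py_alt (record_level : Int) : Int × String :=
  let boundaries : List Int := [5, 10, 20, 30, 40, 50]
  let results : List (Int × String) :=
    [(1, "trace"), (5, "debug"), (9, "info"), (13, "warn"), (17, "error"), (21, "fatal")]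
  let lo := pvBisectB record_level boundaries 0 boundaries.length
  if lo = 0 then (0, "default")
  else (PySem.List.pyGet? results ((lo : Int) - 1)).getD (0, "")

-- ===== PRECONDITION & SPEC =====
def Spec_python_level_to_otel_py (record_level : Int) (out : Int × String) : Prop := out = python_level_to_otel_py_alt record_level
instance (record_level : Int) (out : Int × String) : Decidable (Spec_python_level_to_otel_py record_level out) := by unfold Spec_python_level_to_otel_py; infer_instance

-- ===== CLAIM (what is proved, stated in full; the proofs are below) =====
def Claim_equal_python_level_to_otel_py : Prop := ∀ (record_level : Int), Dom_python_level_to_otel_py record_level → Spec_python_level_to_otel_py record_level (python_level_to_otel_py record_level)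

-- ===== LEMMAS AND PROOFS =====

-- ===== VERDICT (by name: the statement is the Claim_ definition above) =====
theorem python_level_to_otel_py_spec : Claim_equal_python_level_to_otel_py := by
  intro n _
  simp only [Spec_python_level_to_otel_py, python_level_to_otel_py,
    python_level_to_otel_py_alt, pvScanA, List.length_cons, List.length_nil]
  by_cases h5 : n < 5
  · simp [pvBisectB.eq_def, PySem.List.pyGet?, PySem.List.pyIdx?,
      (show ¬ ((50:Int) ≤ n) from by omega),
      (show ¬ ((40:Int) ≤ n) from by omega),
      (show ¬ ((30:Int) ≤ n) from by omega),
      (show ¬ ((20:Int) ≤ n) from by omega),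
      (show ¬ ((10:Int) ≤ n) from by omega),
      (show ¬ ((5:Int) ≤ n) from by omega),
      (show n < (30:Int) from by omega),
      (show n < (10:Int) from by omega),
      (show n < (5:Int) from by omega)]
  · by_cases h10 : n < 10
    · simp [pvBisectB.eq_def, PySem.List.pyGet?, PySem.List.pyIdx?,
        (show ¬ ((50:Int) ≤ n) from by omega),
        (show ¬ ((40:Int) ≤ n) from by omega),
        (show ¬ ((30:Int) ≤ n) from by omega),
        (show ¬ ((20:Int) ≤ n) from by omega),
        (show ¬ ((10:Int) ≤ n) from by omega),
        (show (5:Int) ≤ n from by omega),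
        (show n < (30:Int) from by omega),
        (show n < (10:Int) from by omega),
        (show ¬ (n < (5:Int)) from by omega)]
    · by_cases h20 : n < 20
      · simp [pvBisectB.eq_def, PySem.List.pyGet?, PySem.List.pyIdx?,
          (show ¬ ((50:Int) ≤ n) from by omega),
          (show ¬ ((40:Int) ≤ n) from by omega),
          (show ¬ ((30:Int) ≤ n) from by omega),
          (show ¬ ((20:Int) ≤ n) from by omega),
          (show (10:Int) ≤ n from by omega),
          (show n < (30:Int) from by omega),
          (show ¬ (n < (10:Int)) from by omega),
          (show n < (20:Int) from by omega)]
      · by_cases h30 : n < 30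
        · simp [pvBisectB.eq_def, PySem.List.pyGet?, PySem.List.pyIdx?,
            (show ¬ ((50:Int) ≤ n) from by omega),
            (show ¬ ((40:Int) ≤ n) from by omega),
            (show ¬ ((30:Int) ≤ n) from by omega),
            (show (20:Int) ≤ n from by omega),
            (show n < (30:Int) from by omega),
            (show ¬ (n < (10:Int)) from by omega),
            (show ¬ (n < (20:Int)) from by omega)]
        · by_cases h40 : n < 40
          · simp [pvBisectB.eq_def, PySem.List.pyGet?, PySem.List.pyIdx?,
              (show ¬ ((50:Int) ≤ n) from by omega),
              (show ¬ ((40:Int) ≤ n) from by omega),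
              (show (30:Int) ≤ n from by omega),
              (show ¬ (n < (30:Int)) from by omega),
              (show n < (50:Int) from by omega),
              (show n < (40:Int) from by omega)]
          · by_cases h50 : n < 50
            · simp [pvBisectB.eq_def, PySem.List.pyGet?, PySem.List.pyIdx?,
                (show ¬ ((50:Int) ≤ n) from by omega),
                (show (40:Int) ≤ n from by omega),
                (show ¬ (n < (30:Int)) from by omega),
                (show n < (50:Int) from by omega),
                (show ¬ (n < (40:Int)) from by omega)]
            · simp [pvBisectB.eq_def, PySem.List.pyGet?, PySem.List.pyIdx?,
                (show (50:Int) ≤ n from by omega),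
                (show ¬ (n < (30:Int)) from by omega),
                (show ¬ (n < (50:Int)) from by omega)]
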